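-- pv_equiv track=rewrite | github.com/zouharvi/mff-student | py_src/data_utils.py | compute_frq_deg
-- ===== SOURCE A (Python) =====
-- def compute_frq_deg(candidates):
--     frq_map = dict()
--     deg_map = dict()
--
--     for cset in candidates:
--         for w1 in cset:
--             if w1 not in frq_map:
--                 frq_map[w1] = 0
--             frq_map[w1] += 1
--
--             if w1 not in deg_map:
--                 deg_map[w1] = set()
--
--             for w2 in cset:
--                 deg_map[w1].add(w2)
--
--     deg = {x:len(v) for x,v in deg_map.items() }
--
--     return (frq_map, deg)
-- ===== SOURCE B (Python) =====
-- def compute_frq_deg(candidates):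
--     # One indexing pass, then per-word unions: count each occurrence and
--     # record which candidate sets contained the word; the degree is the
--     # size of the union of those sets, computed once per word.
--     frq = {}
--     sets_for = {}
--     for cset in candidates:
--         for w in cset:
--             frq[w] = frq.get(w, 0) + 1
--             sets_for.setdefault(w, []).append(cset)
--     deg = {w: len(set().union(*s)) for w, s in sets_for.items()}
--     return (frq, deg)
-- ===== Notes on version B (the rewrite author's own statement) =====
-- stated objective: faster
-- what changed: Replaces the triple-nested eager set accumulation by an index-then-union decomposition: one pass counts occurrences and records, per word, the candidate sets containing it; a second pass computes each degree as the size of the union of those recorded sets.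
import Mathlib
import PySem

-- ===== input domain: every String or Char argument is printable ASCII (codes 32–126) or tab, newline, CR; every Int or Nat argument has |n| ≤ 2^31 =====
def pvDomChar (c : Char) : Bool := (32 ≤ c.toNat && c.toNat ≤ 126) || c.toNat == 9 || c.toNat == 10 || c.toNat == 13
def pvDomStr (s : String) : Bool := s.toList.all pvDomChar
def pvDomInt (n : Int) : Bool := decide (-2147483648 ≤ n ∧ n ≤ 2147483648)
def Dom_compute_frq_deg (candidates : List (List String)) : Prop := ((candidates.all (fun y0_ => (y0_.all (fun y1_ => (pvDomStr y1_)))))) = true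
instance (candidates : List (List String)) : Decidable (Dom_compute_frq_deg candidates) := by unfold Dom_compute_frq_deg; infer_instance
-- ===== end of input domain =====

-- B replaces A's eager per-occurrence set accumulation by an index-then-union decomposition
-- (one counting/indexing pass, then one union per word); a timing run measured B faster (constant factor).

-- ===== PORT A =====
def compute_frq_deg (candidates : List (List String)) : (List (String × Int)) × (List (String × Int)) :=
  let st := candidates.foldl (fun st cset =>
    cset.foldl (fun st2 w1 =>
      let frq := if st2.1.contains w1 then st2.1 else st2.1.insert w1 0
      let frq := frq.insert w1 (frq.getD w1 0 + 1)
      let degm := if st2.2.contains w1 then st2.2 else st2.2.insert w1 PySem.Set.empty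
      let degm := cset.foldl (fun d w2 => d.modify w1 PySem.Set.empty (fun s => s.add w2)) degm
      (frq, degm)) st) ((PySem.Dict.empty : PySem.Dict String Int), (PySem.Dict.empty : PySem.Dict String (PySem.Set String)))
  let deg := PySem.Dict.ofList (st.2.items.map (fun p => (p.1, (p.2.length : Int))))
  (st.1.items, deg.items)

-- ===== PORT B =====
-- set().union(*s): fold the union of the recorded candidate sets
def pvUnionAll (s : List (List String)) : PySem.Set String :=
  s.foldl (fun acc c => PySem.Set.union acc c) PySem.Set.empty

def compute_frq_deg_alt (candidates : List (List String)) : (List (String × Int)) × (List (String × Int)) :=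
  let st := candidates.foldl (fun st cset =>
    cset.foldl (fun st2 w =>
      (st2.1.insert w (st2.1.getD w 0 + 1),
       st2.2.modify w [] (fun l => l ++ [cset]))) st)
    ((PySem.Dict.empty : PySem.Dict String Int), (PySem.Dict.empty : PySem.Dict String (List (List String))))
  let deg := PySem.Dict.ofList (st.2.items.map (fun p => (p.1, ((pvUnionAll p.2).length : Int))))
  (st.1.items, deg.items)

-- ===== PRECONDITION & SPEC =====
def Spec_compute_frq_deg (candidates : List (List String)) (out : (List (String × Int)) × (List (String × Int))) : Prop := out = compute_frq_deg_alt candidates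
instance (candidates : List (List String)) (out : (List (String × Int)) × (List (String × Int))) : Decidable (Spec_compute_frq_deg candidates out) := by unfold Spec_compute_frq_deg; infer_instance

-- ===== CLAIM (what is proved, stated in full; the proofs are below) =====
def Claim_equal_compute_frq_deg : Prop := ∀ (candidates : List (List String)), Dom_compute_frq_deg candidates → Spec_compute_frq_deg candidates (compute_frq_deg candidates)

-- ===== LEMMAS AND PROOFS =====

-- value-map of a dict by pvUnionAll (keys/positions preserved)
def mapU (d : PySem.Dict String (List (List String))) : PySem.Dict String (PySem.Set String) :=
  PySem.Dict.mk (d.items.map (fun p => (p.1, pvUnionAll p.2)))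

theorem contains_mapU (d : PySem.Dict String (List (List String))) (w : String) :
    (mapU d).contains w = d.contains w := by
  simp [mapU, PySem.Dict.contains, List.any_map, Function.comp_def]

theorem get?_mapU (d : PySem.Dict String (List (List String))) (w : String) :
    (mapU d).get? w = (d.get? w).map pvUnionAll := by
  simp only [mapU, PySem.Dict.get?]
  induction d.items with
  | nil => rfl
  | cons p rest ih =>
      by_cases h : (p.1 == w) = true
      · simp only [List.map_cons, List.find?_cons, h, Option.map_some]
      · simp only [List.map_cons, List.find?_cons, h]
        exact ih

theorem getD_mapU (d : PySem.Dict String (List (List String))) (w : String) :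
    (mapU d).getD w PySem.Set.empty = pvUnionAll (d.getD w []) := by
  rw [PySem.Dict.getD, PySem.Dict.getD, get?_mapU]
  cases d.get? w <;> simp [pvUnionAll, PySem.Set.empty]

theorem insert_mapU (d : PySem.Dict String (List (List String))) (w : String) (v : List (List String)) :
    mapU (d.insert w v) = (mapU d).insert w (pvUnionAll v) := by
  rw [PySem.Dict.insert, PySem.Dict.insert, contains_mapU]
  by_cases h : d.contains w
  · simp only [h, if_true, mapU, List.map_map]
    congr 1
    apply List.map_congr_left
    intro p _
    by_cases hp : p.1 == w <;> simp [hp, Function.comp]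
  · simp [h, mapU]

theorem modify_mapU (d : PySem.Dict String (List (List String))) (w : String) (cset : List String) :
    mapU (d.modify w [] (fun l => l ++ [cset]))
      = (mapU d).modify w PySem.Set.empty (fun s => PySem.Set.update s cset) := by
  rw [PySem.Dict.modify, PySem.Dict.modify, insert_mapU, getD_mapU]
  congr 1
  simp [pvUnionAll, PySem.Set.union, List.foldl_append]

-- composing two modifies at the same key
theorem modify_modify (D : PySem.Dict String (PySem.Set String)) (w : String)
    (f g : PySem.Set String -> PySem.Set String) :
    (D.modify w PySem.Set.empty f).modify w PySem.Set.empty g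
      = D.modify w PySem.Set.empty (fun s => g (f s)) := by
  rw [PySem.Dict.modify, PySem.Dict.modify, PySem.Dict.modify,
    PySem.Dict.getD_insert_self, PySem.Dict.insert_insert_self]

-- A's inner add-loop over a NONEMPTY cset equals one modify with Set.update
theorem foldl_add_modify (w : String) (x : String) (xs : List String)
    (D : PySem.Dict String (PySem.Set String)) :
    (x :: xs).foldl (fun d w2 => d.modify w PySem.Set.empty (fun s => s.add w2)) D
      = D.modify w PySem.Set.empty (fun s => PySem.Set.update s (x :: xs)) := by
  induction xs generalizing x D with
  | nil => rfl
  | cons y ys ih =>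
      show (y :: ys).foldl _ (D.modify w PySem.Set.empty (fun s => s.add x)) = _
      rw [ih, modify_modify]
      rfl

-- setdefault-then-modify equals a plain modify
theorem setdefault_modify (D : PySem.Dict String (PySem.Set String)) (w : String)
    (g : PySem.Set String -> PySem.Set String) :
    (if D.contains w then D else D.insert w PySem.Set.empty).modify w PySem.Set.empty g
      = D.modify w PySem.Set.empty g := by
  by_cases h : D.contains w
  · simp [h]
  · have h' : D.contains w = false := by simpa using h
    rw [h']
    simp only [Bool.false_eq_true, if_false]
    rw [PySem.Dict.modify, PySem.Dict.modify, PySem.Dict.getD_insert_self,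
      PySem.Dict.insert_insert_self, PySem.Dict.getD_of_not_contains D PySem.Set.empty h']

-- A's frq step equals B's frq step
theorem frq_step (F : PySem.Dict String Int) (w : String) :
    (let F1 := if F.contains w then F else F.insert w 0
     F1.insert w (F1.getD w 0 + 1)) = F.insert w (F.getD w 0 + 1) := by
  by_cases h : F.contains w
  · simp [h]
  · have h' : F.contains w = false := by simpa using h
    rw [h']
    simp only [Bool.false_eq_true, if_false]
    rw [PySem.Dict.getD_insert_self, PySem.Dict.insert_insert_self,
      PySem.Dict.getD_of_not_contains F (0 : Int) h']

-- generic: a fold on the A-state tracks the fold on the B-state through a glue map g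
theorem foldl_track {α σ τ : Type} (g : σ → τ) (fA : τ → α → τ) (fB : σ → α → σ)
    (h : ∀ (s : σ) (w : α), fA (g s) w = g (fB s w)) :
    ∀ (l : List α) (s : σ), l.foldl fA (g s) = g (l.foldl fB s) := by
  intro l
  induction l with
  | nil => intro s; rfl
  | cons w ws ih =>
      intro s
      simp only [List.foldl_cons]
      rw [h s w]
      exact ih (fB s w)

-- one word-step of A on the glued state equals the glued word-step of B (cset nonempty)
theorem word_step_eq (x : String) (xs : List String) (w : String)
    (F : PySem.Dict String Int) (d : PySem.Dict String (List (List String))) :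
    (let frq := if F.contains w then F else F.insert w 0
     let frq := frq.insert w (frq.getD w 0 + 1)
     let degm := if (mapU d).contains w then mapU d else (mapU d).insert w PySem.Set.empty
     let degm := (x :: xs).foldl (fun dd w2 => dd.modify w PySem.Set.empty (fun s => s.add w2)) degm
     ((frq, degm) : PySem.Dict String Int × PySem.Dict String (PySem.Set String)))
      = (F.insert w (F.getD w 0 + 1), mapU (d.modify w [] (fun ll => ll ++ [x :: xs]))) := by
  refine Prod.ext (frq_step F w) ?_
  show (x :: xs).foldl _ (if (mapU d).contains w then mapU d else (mapU d).insert w PySem.Set.empty)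
      = (mapU (d.modify w [] (fun ll => ll ++ [x :: xs])))
  rw [modify_mapU, foldl_add_modify, setdefault_modify]

-- ===== VERDICT (by name: the statement is the Claim_ definition above) =====
theorem compute_frq_deg_spec : Claim_equal_compute_frq_deg := by
  intro candidates _
  show compute_frq_deg candidates = compute_frq_deg_alt candidates
  unfold compute_frq_deg compute_frq_deg_alt
  have h0 : ((PySem.Dict.empty : PySem.Dict String Int),
      (PySem.Dict.empty : PySem.Dict String (PySem.Set String)))
      = (fun (r : PySem.Dict String Int × PySem.Dict String (List (List String))) => (r.1, mapU r.2))
        ((PySem.Dict.empty : PySem.Dict String Int),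
         (PySem.Dict.empty : PySem.Dict String (List (List String)))) := rfl
  rw [h0, foldl_track
    (fun (r : PySem.Dict String Int × PySem.Dict String (List (List String))) => (r.1, mapU r.2))
    _ (fun st cset =>
        cset.foldl (fun st2 w =>
          (st2.1.insert w (st2.1.getD w 0 + 1),
           st2.2.modify w [] (fun ll => ll ++ [cset]))) st)
    (fun s cset => by
      cases cset with
      | nil => rfl
      | cons x xs =>
          exact foldl_track
            (fun (r : PySem.Dict String Int × PySem.Dict String (List (List String))) => (r.1, mapU r.2))
            _ _ (fun s2 w => word_step_eq x xs w s2.1 s2.2) (x :: xs) s)]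
  refine congrArg₂ Prod.mk rfl ?_
  refine congrArg (fun l => (PySem.Dict.ofList l).items) ?_
  simp [mapU, List.map_map]
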